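-- pv_equiv track=rewrite | github.com/dcxSt/numerical_integrators | modified_equations.py | convolve_pihsr
-- ===== SOURCE A (Python) =====
-- import itertools
--
-- def convolve_pihsr(arrays):
--     convolved = arrays[0]
--     arrays = arrays[1:]
--     while arrays:
--         conv_step = itertools.product(convolved,arrays[0])
--         conv_next = []
--         for i,j in conv_step:
--             # add h order coefs and concatenate the lists
--             conv_next.append([i[0] + j[0] , i[1] + j[1]])
--         convolved = conv_next
--         arrays = arrays[1:]
--     # put it in order so that it's human redable
--     convolved.sort()
--     return convolved
-- ===== SOURCE B (Python) =====
-- def convolve_pihsr(arrays):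
--     # recursive left fold over the prefix length instead of A's destructive while loop
--     def go(k):
--         if k == 1:
--             return arrays[0]
--         prev = go(k - 1)
--         return [[i[0] + j[0], i[1] + j[1]] for i in prev for j in arrays[k - 1]]
--     return sorted(go(len(arrays)))
-- ===== Notes on version B (the rewrite author's own statement) =====
-- stated objective: alternative
-- what changed: Replaces A's destructive while loop (itertools.product, an explicit append loop building conv_next, repeated arrays = arrays[1:] slicing, in-place .sort()) by a recursion on the prefix length whose step is one double comprehension, followed by sorted() on the result.
import Mathlib
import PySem

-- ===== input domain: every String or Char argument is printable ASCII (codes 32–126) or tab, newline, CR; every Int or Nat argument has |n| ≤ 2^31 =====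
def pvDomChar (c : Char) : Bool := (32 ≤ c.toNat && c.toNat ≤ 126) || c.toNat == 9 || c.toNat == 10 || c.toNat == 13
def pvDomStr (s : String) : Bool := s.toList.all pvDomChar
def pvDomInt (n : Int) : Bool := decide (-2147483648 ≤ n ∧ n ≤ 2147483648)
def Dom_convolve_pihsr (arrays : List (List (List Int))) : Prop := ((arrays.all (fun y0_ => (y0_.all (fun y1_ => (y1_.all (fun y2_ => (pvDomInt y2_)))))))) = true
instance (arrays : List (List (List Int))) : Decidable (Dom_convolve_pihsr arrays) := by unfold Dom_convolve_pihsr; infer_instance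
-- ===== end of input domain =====

-- B replaces A's destructive while-loop (itertools.product + append loop rebuilding
-- an intermediate list and slicing arrays each step) by a recursion on the prefix
-- length with a direct double comprehension (objective: alternative decomposition).
-- Return-value equivalence only: Python A sorts its result list in place via
-- convolved.sort() (observable when len(arrays) == 1); B never mutates its argument.


-- ===== PORT A =====
-- one step of A's while-loop body: itertools.product(convolved, arrays[0]) then the
-- for-loop appending [i[0]+j[0], i[1]+j[1]] to conv_next
def pvStepA (c a : List (List Int)) : List (List Int) :=
  (c.flatMap (fun i => a.map (fun j => (i, j)))).foldl
    (fun acc ij =>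
      acc ++ [[PySem.List.pyGetD ij.1 0 0 + PySem.List.pyGetD ij.2 0 0,
               PySem.List.pyGetD ij.1 1 0 + PySem.List.pyGetD ij.2 1 0]]) []

-- A's while-loop: consume 'arrays' front to back, carrying 'convolved'
def pvLoopA (convolved : List (List Int)) (arrays : List (List (List Int))) : List (List Int) :=
  match arrays with
  | [] => convolved
  | a :: rest => pvLoopA (pvStepA convolved a) rest

def convolve_pihsr (arrays : List (List (List Int))) : List (List Int) :=
  match arrays with
  | [] => []  -- arrays[0] raises IndexError in Python; excluded by Pre_
  | a0 :: rest => PySem.List.sorted (pvLoopA a0 rest) (fun x => x) false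

-- ===== PORT B =====
-- B's inner recursion go(k): result for the prefix arrays[0:k]
-- (go(k) for k ≤ 0 diverges in Python; only reached for arrays = [], outside Pre_)
def pvGoB (arrays : List (List (List Int))) : Nat → List (List Int)
  | 0 => []
  | 1 => PySem.List.pyGetD arrays 0 []
  | k + 2 =>
    (pvGoB arrays (k + 1)).flatMap (fun i =>
      (PySem.List.pyGetD arrays ((k : Int) + 1) []).map (fun j =>
        [PySem.List.pyGetD i 0 0 + PySem.List.pyGetD j 0 0,
         PySem.List.pyGetD i 1 0 + PySem.List.pyGetD j 1 0]))

def convolve_pihsr_alt (arrays : List (List (List Int))) : List (List Int) :=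
  PySem.List.sorted (pvGoB arrays arrays.length) (fun x => x) false

-- ===== PRECONDITION & SPEC =====
-- Pre_ excludes exactly the inputs on which Python A raises IndexError: the empty
-- input (arrays[0]), and inputs whose leading run of ≥ 2 nonempty arrays contains an
-- entry shorter than 2 (the i[1]/j[1] accesses as the loop reaches those arrays).
def Pre_convolve_pihsr (arrays : List (List (List Int))) : Prop :=
  arrays ≠ [] ∧
    ((arrays.takeWhile (fun a => !a.isEmpty)).length ≤ 1 ∨
      ∀ a ∈ arrays.takeWhile (fun a => !a.isEmpty), ∀ e ∈ a, 2 ≤ e.length)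
instance (arrays : List (List (List Int))) : Decidable (Pre_convolve_pihsr arrays) := by unfold Pre_convolve_pihsr; infer_instance

def pvWitness_convolve_pihsr : List (List (List Int)) := [[[0, 1], [2, -1]], [[1, 5]]]

def Spec_convolve_pihsr (arrays : List (List (List Int))) (out : List (List Int)) : Prop := out = convolve_pihsr_alt arrays
instance (arrays : List (List (List Int))) (out : List (List Int)) : Decidable (Spec_convolve_pihsr arrays out) := by unfold Spec_convolve_pihsr; infer_instance

-- ===== CLAIM (what is proved, stated in full; the proofs are below) =====
def Claim_equal_convolve_pihsr : Prop := ∀ (arrays : List (List (List Int))), Dom_convolve_pihsr arrays → Pre_convolve_pihsr arrays → Spec_convolve_pihsr arrays (convolve_pihsr arrays)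

-- ===== LEMMAS AND PROOFS =====

-- B's combining step, as pvStepA computes it after unrolling the append-fold
def pvStepB (c a : List (List Int)) : List (List Int) :=
  c.flatMap (fun i => a.map (fun j =>
    [PySem.List.pyGetD i 0 0 + PySem.List.pyGetD j 0 0,
     PySem.List.pyGetD i 1 0 + PySem.List.pyGetD j 1 0]))

theorem pvStepA_eq_stepB (c a : List (List Int)) : pvStepA c a = pvStepB c a := by
  unfold pvStepA pvStepB
  rw [PySem.List.foldl_append_singleton_eq_map]
  simp [List.map_flatMap, List.map_map, Function.comp_def]

-- A's loop applied to a snoc of the remaining arrays peels the LAST step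
theorem pvLoopA_snoc (l : List (List (List Int))) (a : List (List Int)) :
    ∀ c, pvLoopA c (l ++ [a]) = pvStepB (pvLoopA c l) a := by
  induction l with
  | nil => intro c; simpa [pvLoopA] using pvStepA_eq_stepB c a
  | cons b l ih => intro c; simpa [pvLoopA] using ih (pvStepA c b)

-- pvGoB k only looks at the first k arrays
theorem pvGoB_append (ys : List (List (List Int))) :
    ∀ (k : Nat) (xs : List (List (List Int))), k ≤ xs.length →
      pvGoB (xs ++ ys) k = pvGoB xs k := by
  intro k
  induction k using Nat.strong_induction_on with
  | _ k ih =>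
    intro xs hk
    match k with
    | 0 => rfl
    | 1 =>
      show PySem.List.pyGetD (xs ++ ys) 0 [] = PySem.List.pyGetD xs 0 []
      rcases xs with _ | ⟨x, xs⟩
      · simp at hk
      · simp [PySem.List.pyGetD_zero_cons]
    | k + 2 =>
      show (pvGoB (xs ++ ys) (k + 1)).flatMap _ = (pvGoB xs (k + 1)).flatMap _
      rw [ih (k + 1) (by omega) xs (by omega)]
      have hidx : PySem.List.pyGetD (xs ++ ys) ((k : Int) + 1) []
          = PySem.List.pyGetD xs ((k : Int) + 1) [] := by
        have h1 : ((k : Int) + 1) = ((k + 1 : Nat) : Int) := by push_cast; ring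
        rw [h1, PySem.List.pyGetD_natCast, PySem.List.pyGetD_natCast,
          List.getD, List.getD, List.getElem?_append_left (by omega)]
      rw [hidx]

-- B's recursion on the prefix length equals A's loop, for every nonempty input
theorem pvGoB_eq_loopA (a0 : List (List Int)) (rest : List (List (List Int))) :
    pvGoB (a0 :: rest) (rest.length + 1) = pvLoopA a0 rest := by
  induction rest using List.reverseRecOn with
  | nil => simp [pvGoB, pvLoopA, PySem.List.pyGetD_zero_cons]
  | append_singleton l a ih =>
    have hlen : (l ++ [a]).length + 1 = l.length + 1 + 1 := by simp
    rw [hlen]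
    show (pvGoB (a0 :: (l ++ [a])) (l.length + 1)).flatMap _ = _
    rw [pvLoopA_snoc]
    have h1 : a0 :: (l ++ [a]) = (a0 :: l) ++ [a] := by simp
    rw [h1, pvGoB_append [a] (l.length + 1) (a0 :: l) (by simp), ih]
    have hidx : PySem.List.pyGetD ((a0 :: l) ++ [a]) ((l.length : Int) + 1) [] = a := by
      have h2 : ((l.length : Int) + 1) = (((a0 :: l).length : Nat) : Int) := by
        simp
      rw [h2, PySem.List.pyGetD_natCast]
      simp [List.getD]
    rw [hidx]
    rfl

-- ===== VERDICT (by name: the statement is the Claim_ definition above) =====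
theorem convolve_pihsr_spec : Claim_equal_convolve_pihsr := by
  intro arrays _ hpre
  rcases arrays with _ | ⟨a0, rest⟩
  · exact absurd rfl hpre.1
  show PySem.List.sorted (pvLoopA a0 rest) (fun x => x) false = convolve_pihsr_alt (a0 :: rest)
  unfold convolve_pihsr_alt
  rw [List.length_cons, pvGoB_eq_loopA]
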